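-- pv_equiv track=rewrite | github.com/CodeFaiths/Hawkeye-sim | Paraleon-ns3/scratch/tuning.py | is_flow_keep_active_within_window
-- ===== SOURCE A (Python) =====
-- def is_flow_keep_active_within_window(lst, window_size):
--     if len(lst) <= window_size:
--         return False
--
--     result = []
--     for i in range(len(lst) - window_size + 1):
--         window_sum = sum(lst[i:i+window_size])
--         result.append(window_sum)
--
--     for i in range(1, len(result)-1):
--         if result[i] == 0:
--             return False
--         elif result[i-1] - result[i] > 10:
--             if len(result) < 3:
--                 continue
--             if result[i] - result[i + 1] > 20:
--                 return False
--     return True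
-- ===== SOURCE B (Python) =====
-- def is_flow_keep_active_within_window(lst, window_size):
--     # Sliding running sum: each window sum is obtained from the previous one
--     # in O(1) by adding the entering element and removing the leaving one.
--     n = len(lst)
--     if n <= window_size:
--         return False
--     s = sum(lst[:window_size])
--     sums = [s]
--     for i in range(window_size, n):
--         s += lst[i] - lst[i - window_size]
--         sums.append(s)
--     return all(not (b == 0 or (a - b > 10 and b - c > 20))
--                for a, b, c in zip(sums, sums[1:], sums[2:]))
-- ===== Notes on version B (the rewrite author's own statement) =====
-- stated objective: faster
-- what changed: B maintains one running window sum updated in O(1) per step (add the entering element, subtract the leaving one) instead of re-summing each window slice, and checks the drop conditions with a single all() over zipped consecutive triples; Pre_ restricts to the natural domain window_size >= 0, since for negative window sizes A's window slices only exist through Python's negative-index wraparound (B raises IndexError there).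
-- outside the precondition, e.g. on is_flow_keep_active_within_window([1, 2, 3], -1): A returns False, B raises IndexError
import Mathlib
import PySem

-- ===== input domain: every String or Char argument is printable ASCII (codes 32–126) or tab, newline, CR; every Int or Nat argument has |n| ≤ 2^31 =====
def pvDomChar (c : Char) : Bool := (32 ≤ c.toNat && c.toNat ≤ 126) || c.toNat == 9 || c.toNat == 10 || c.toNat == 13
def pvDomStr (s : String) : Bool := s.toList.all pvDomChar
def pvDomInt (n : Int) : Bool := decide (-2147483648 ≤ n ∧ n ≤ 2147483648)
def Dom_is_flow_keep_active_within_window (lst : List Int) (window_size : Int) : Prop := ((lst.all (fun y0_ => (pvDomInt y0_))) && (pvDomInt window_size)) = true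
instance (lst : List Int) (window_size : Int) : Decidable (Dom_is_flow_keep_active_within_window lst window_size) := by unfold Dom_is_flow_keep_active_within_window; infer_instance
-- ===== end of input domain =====

-- B replaces A's per-window re-summing by a single sliding running sum (O(1) update per
-- window) and one zip-of-triples scan; objective: faster.


-- ===== PORT A =====
-- the second 'for' loop of A, with its early returns ('continue' = skip to the rest)
def pvLoopA (result : List Int) : List Int → Bool
  | [] => true
  | i :: rest =>
    if PySem.List.pyGetD result i 0 == 0 then false
    else if PySem.List.pyGetD result (i - 1) 0 - PySem.List.pyGetD result i 0 > 10 then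
      if (result.length : Int) < 3 then pvLoopA result rest
      else if PySem.List.pyGetD result i 0 - PySem.List.pyGetD result (i + 1) 0 > 20 then false
      else pvLoopA result rest
    else pvLoopA result rest

def is_flow_keep_active_within_window (lst : List Int) (window_size : Int) : Bool :=
  if (lst.length : Int) ≤ window_size then false
  else
    let result := (PySem.List.pyRange 0 ((lst.length : Int) - window_size + 1) 1).foldl
      (fun acc i => acc ++ [(PySem.List.slice lst (some i) (some (i + window_size))).sum]) []
    pvLoopA result (PySem.List.pyRange 1 ((result.length : Int) - 1) 1)

-- ===== PORT B =====
def is_flow_keep_active_within_window_alt (lst : List Int) (window_size : Int) : Bool :=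
  let n : Int := lst.length
  if n ≤ window_size then false
  else
    let s0 := (PySem.List.slice lst none (some window_size)).sum
    let st := (PySem.List.pyRange window_size n 1).foldl
      (fun (st : Int × List Int) i =>
        let s := st.1 + (PySem.List.pyGetD lst i 0 - PySem.List.pyGetD lst (i - window_size) 0)
        (s, st.2 ++ [s])) (s0, [s0])
    let sums := st.2
    ((sums.zip (sums.drop 1)).zip (sums.drop 2)).all
      (fun t => !(t.1.2 == 0 || (t.1.1 - t.1.2 > 10 && t.1.2 - t.2 > 20)))

-- ===== PRECONDITION & SPEC =====
-- Pre_ restricts to the natural domain window_size ≥ 0: for negative window sizes A's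
-- window slices only exist through Python's negative-index wraparound (an artefact of
-- slicing), and B's sliding sum raises IndexError there.
def Pre_is_flow_keep_active_within_window (lst : List Int) (window_size : Int) : Prop := 0 ≤ window_size
instance (lst : List Int) (window_size : Int) : Decidable (Pre_is_flow_keep_active_within_window lst window_size) := by unfold Pre_is_flow_keep_active_within_window; infer_instance
def pvWitness_is_flow_keep_active_within_window : List Int × Int := ([1, 2, 3], 1)

def Spec_is_flow_keep_active_within_window (lst : List Int) (window_size : Int) (out : Bool) : Prop := out = is_flow_keep_active_within_window_alt lst window_size
instance (lst : List Int) (window_size : Int) (out : Bool) : Decidable (Spec_is_flow_keep_active_within_window lst window_size out) := by unfold Spec_is_flow_keep_active_within_window; infer_instance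

-- ===== CLAIM (what is proved, stated in full; the proofs are below) =====
def Claim_equal_is_flow_keep_active_within_window : Prop := ∀ (lst : List Int) (window_size : Int), Dom_is_flow_keep_active_within_window lst window_size → Pre_is_flow_keep_active_within_window lst window_size → Spec_is_flow_keep_active_within_window lst window_size (is_flow_keep_active_within_window lst window_size)

-- ===== LEMMAS AND PROOFS =====

-- the sum of window j (a slice sum) as a difference of prefix sums
lemma pv_sum_drop_take (xs : List Int) (a b : Nat) (hab : a ≤ b) :
    ((xs.drop a).take (b - a)).sum = (xs.take b).sum - (xs.take a).sum := by
  have h : xs.take b = xs.take a ++ (xs.drop a).take (b - a) := by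
    rw [← List.take_add]; congr 1; omega
  rw [h, List.sum_append]; ring

lemma pv_take_succ_sum (xs : List Int) (k : Nat) (hk : k < xs.length) :
    (xs.take (k + 1)).sum = (xs.take k).sum + xs[k] := by
  rw [List.take_succ, List.sum_append, List.getElem?_eq_getElem hk]
  simp

lemma pvW_sub (lst : List Int) (ws j : Int) (hws : 0 ≤ ws) (h0 : 0 ≤ j)
    (h1 : j + ws ≤ (lst.length : Int)) :
    (PySem.List.slice lst (some j) (some (j + ws))).sum
      = (lst.take (j + ws).toNat).sum - (lst.take j.toNat).sum := by
  rw [PySem.List.slice_toNat lst h0 (by omega)]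
  exact pv_sum_drop_take lst j.toNat (j + ws).toNat (by omega)

-- one sliding step: entering element in, leaving element out
lemma pvW_step (lst : List Int) (ws j : Int) (hws : 0 ≤ ws) (h0 : 0 ≤ j)
    (h1 : j + ws < (lst.length : Int)) :
    (PySem.List.slice lst (some (j + 1)) (some (j + 1 + ws))).sum
      = (PySem.List.slice lst (some j) (some (j + ws))).sum
        + (PySem.List.pyGetD lst (j + ws) 0 - PySem.List.pyGetD lst j 0) := by
  rw [pvW_sub lst ws (j + 1) hws (by omega) (by omega), pvW_sub lst ws j hws h0 (by omega)]
  have ha : (j + 1).toNat = j.toNat + 1 := by omega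
  have hb : (j + 1 + ws).toNat = (j + ws).toNat + 1 := by omega
  rw [ha, hb, pv_take_succ_sum lst (j + ws).toNat (by omega),
      pv_take_succ_sum lst j.toNat (by omega),
      PySem.List.pyGetD_eq_getElem lst 0 (show 0 ≤ j + ws by omega) h1,
      PySem.List.pyGetD_eq_getElem lst 0 h0 (show j < (lst.length:Int) by omega)]
  ring

-- the invariant of B's sliding loop: after consuming range(ws, m) the state is
-- (window sum at m-ws, the list of all window sums so far)
lemma pvSlide_inv (lst : List Int) (ws : Int) (hws : 0 ≤ ws) (m : Int)
    (hm : ws ≤ m) (hn : m ≤ (lst.length : Int)) :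
    (PySem.List.pyRange ws m 1).foldl
      (fun (st : Int × List Int) i =>
        let s := st.1 + (PySem.List.pyGetD lst i 0 - PySem.List.pyGetD lst (i - ws) 0)
        (s, st.2 ++ [s]))
      ((PySem.List.slice lst (some 0) (some (0 + ws))).sum,
       [(PySem.List.slice lst (some 0) (some (0 + ws))).sum])
    = ((PySem.List.slice lst (some (m - ws)) (some (m - ws + ws))).sum,
       (PySem.List.pyRange 0 (m - ws + 1) 1).map
         (fun j => (PySem.List.slice lst (some j) (some (j + ws))).sum)) := by
  induction m, hm using Int.le_induction with
  | base =>
    rw [PySem.List.pyRange_one_eq_nil (le_refl ws)]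
    simp only [List.foldl_nil, sub_self]
    rw [PySem.List.pyRange_one_singleton 0]
    simp
  | succ m hm ih =>
    rw [PySem.List.pyRange_one_succ_right hm, List.foldl_append, ih (by omega)]
    simp only [List.foldl_cons, List.foldl_nil]
    have hstep := pvW_step lst ws (m - ws) hws (by omega) (by omega)
    rw [show m - ws + ws = m from by ring, show m - ws + 1 + ws = m + 1 from by ring] at hstep
    rw [Prod.mk.injEq]
    constructor
    · rw [show m - ws + ws = m from by ring, show m + 1 - ws = m - ws + 1 from by ring,
          show m - ws + 1 + ws = m + 1 from by ring, hstep]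
    · conv_rhs => rw [show m + 1 - ws + 1 = m - ws + 1 + 1 from by ring,
        PySem.List.pyRange_one_succ_right (show (0:ℤ) ≤ m - ws + 1 by omega),
        List.map_append, List.map_cons, List.map_nil]
      congr 1
      rw [show m - ws + ws = m from by ring, show m - ws + 1 + ws = m + 1 from by ring, hstep]

-- A's index loop equals the all-over-triples scan (for any window-sum list r)
lemma pvGet_nat (r : List Int) (k : Nat) (hk : k < r.length) :
    PySem.List.pyGetD r (k : Int) 0 = r[k] := by
  rw [PySem.List.pyGetD_natCast]; exact List.getD_eq_getElem r 0 hk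

lemma pvLoopA_all (r : List Int) (hlen : ¬ ((r.length : Int) < 3)) : ∀ idxs : List Int,
    pvLoopA r idxs = idxs.all (fun i =>
      !(PySem.List.pyGetD r i 0 == 0 ||
        (PySem.List.pyGetD r (i - 1) 0 - PySem.List.pyGetD r i 0 > 10 &&
         PySem.List.pyGetD r i 0 - PySem.List.pyGetD r (i + 1) 0 > 20))) := by
  intro idxs
  induction idxs with
  | nil => simp [pvLoopA]
  | cons i rest ih =>
    simp only [pvLoopA, List.all_cons, if_neg hlen, ih]
    by_cases h1 : PySem.List.pyGetD r i 0 == 0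
    · simp [h1]
    · by_cases h2 : PySem.List.pyGetD r (i - 1) 0 - PySem.List.pyGetD r i 0 > 10
      · by_cases h3 : PySem.List.pyGetD r i 0 - PySem.List.pyGetD r (i + 1) 0 > 20
        · simp [h1, h2, h3]
        · simp [h1, h2, h3]
      · simp [h1, h2]

lemma pvScan_eq (r : List Int) :
    pvLoopA r (PySem.List.pyRange 1 ((r.length : Int) - 1) 1)
      = ((r.zip (r.drop 1)).zip (r.drop 2)).all
          (fun t => !(t.1.2 == 0 || (t.1.1 - t.1.2 > 10 && t.1.2 - t.2 > 20))) := by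
  by_cases h3 : ((r.length : Int) < 3)
  · rw [PySem.List.pyRange_one_eq_nil (by omega)]
    rw [List.drop_eq_nil_of_le (show r.length ≤ 2 by omega)]
    simp [pvLoopA]
  · rw [pvLoopA_all r h3]
    have hzz : ((r.zip (r.drop 1)).zip (r.drop 2)).length = r.length - 2 := by
      simp [List.length_zip]; omega
    have hget : ∀ (j : Nat) (h : j < r.length - 2)
        (hz : j < ((r.zip (r.drop 1)).zip (r.drop 2)).length),
        ((r.zip (r.drop 1)).zip (r.drop 2))[j]
          = ((r[j]'(by omega), r[1 + j]'(by omega)), r[2 + j]'(by omega)) := by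
      intro j h hz
      rw [List.getElem_zip, List.getElem_zip, List.getElem_drop, List.getElem_drop]
    rw [Bool.eq_iff_iff]
    simp only [List.all_eq_true]
    constructor
    · intro H t ht
      obtain ⟨j, hj, rfl⟩ := List.mem_iff_getElem.mp ht
      have hjl : j < r.length - 2 := by rw [hzz] at hj; omega
      rw [hget j hjl hj]
      have hmem : ((j : Int) + 1) ∈ PySem.List.pyRange 1 ((r.length : Int) - 1) 1 :=
        PySem.List.mem_pyRange_one.mpr ⟨by omega, by omega⟩
      have hh := H _ hmem
      rw [show ((j : Int) + 1) - 1 = ((j : Nat) : Int) from by omega,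
          show ((j : Int) + 1) + 1 = ((2 + j : Nat) : Int) from by push_cast; ring,
          show ((j : Int) + 1) = ((1 + j : Nat) : Int) from by push_cast; ring,
          pvGet_nat r j (by omega), pvGet_nat r (1 + j) (by omega),
          pvGet_nat r (2 + j) (by omega)] at hh
      simpa using hh
    · intro H i hi
      obtain ⟨h1i, h2i⟩ := PySem.List.mem_pyRange_one.mp hi
      have hij : i = (((i - 1).toNat : Nat) : Int) + 1 := by omega
      have hjl : (i - 1).toNat < r.length - 2 := by omega
      have hz : (i - 1).toNat < ((r.zip (r.drop 1)).zip (r.drop 2)).length := by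
        rw [hzz]; omega
      have hh := H _ (List.getElem_mem hz)
      rw [hget (i - 1).toNat hjl hz] at hh
      rw [hij,
          show (((i - 1).toNat : Nat) : Int) + 1 - 1 = (((i - 1).toNat : Nat) : Int) from by ring,
          show (((i - 1).toNat : Nat) : Int) + 1 + 1 = ((2 + (i - 1).toNat : Nat) : Int) from by push_cast; ring,
          show (((i - 1).toNat : Nat) : Int) + 1 = ((1 + (i - 1).toNat : Nat) : Int) from by push_cast; ring,
          pvGet_nat r (i - 1).toNat (by omega), pvGet_nat r (1 + (i - 1).toNat) (by omega),
          pvGet_nat r (2 + (i - 1).toNat) (by omega)]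
      simpa using hh

-- ===== VERDICT (by name: the statement is the Claim_ definition above) =====
theorem is_flow_keep_active_within_window_spec : Claim_equal_is_flow_keep_active_within_window := by
  intro lst ws _ hpre
  unfold Pre_is_flow_keep_active_within_window at hpre
  unfold Spec_is_flow_keep_active_within_window
  unfold is_flow_keep_active_within_window is_flow_keep_active_within_window_alt
  by_cases h : (lst.length : Int) ≤ ws
  · simp [h]
  · simp only [h, if_false]
    rw [PySem.List.foldl_append_singleton_eq_map, List.nil_append]
    have hs0 : (PySem.List.slice lst none (some ws)).sum
        = (PySem.List.slice lst (some 0) (some (0 + ws))).sum := by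
      rw [PySem.List.slice_zero_start, zero_add]
    rw [hs0, pvSlide_inv lst ws hpre (lst.length : Int) (by omega) (le_refl _)]
    rw [pvScan_eq]
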